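-- pv_equiv track=rewrite | github.com/klimzaporojets/consistent-EL | src/util/ner.py | decode_segments
-- ===== SOURCE A (Python) =====
-- def decode_segments(indices, labels):
--     outputs = []
--     for lst in indices:
--         data = [labels[x] for x in lst]
--
--         output = []
--         start = -1
--         type = None
--         for pos, target in enumerate(data):
--             if target.startswith('B-'):
--                 if start >= 0:
--                     output.append((start, pos, type))
--                 start = pos
--                 type = target[2:]
--             elif target == 'O':
--                 if start >= 0:
--                     output.append((start, pos, type))
--                     start = -1
--                     type = None
--
--         if start >= 0:
--             output.append((start, len(data), type))
--         outputs.append(output)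
--     return outputs
-- ===== SOURCE B (Python) =====
-- def _decode_one(data):
--     n = len(data)
--     stops = [pos for pos, lab in enumerate(data) if lab.startswith('B-') or lab == 'O']
--     return [(pos, next((q for q in stops if q > pos), n), lab[2:])
--             for pos, lab in enumerate(data) if lab.startswith('B-')]
--
--
-- def decode_segments(indices, labels):
--     return [_decode_one([labels[x] for x in lst]) for lst in indices]
-- ===== Notes on version B (the rewrite author's own statement) =====
-- stated objective: alternative
-- what changed: Replaces A's transition-emitting state machine (tracking start/type across the scan and flushing a trailing segment) by an event-index decomposition: collect the B-/O boundary positions once, then pair each B- start with the first boundary position after it (or the sequence length if none).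
import Mathlib
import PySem

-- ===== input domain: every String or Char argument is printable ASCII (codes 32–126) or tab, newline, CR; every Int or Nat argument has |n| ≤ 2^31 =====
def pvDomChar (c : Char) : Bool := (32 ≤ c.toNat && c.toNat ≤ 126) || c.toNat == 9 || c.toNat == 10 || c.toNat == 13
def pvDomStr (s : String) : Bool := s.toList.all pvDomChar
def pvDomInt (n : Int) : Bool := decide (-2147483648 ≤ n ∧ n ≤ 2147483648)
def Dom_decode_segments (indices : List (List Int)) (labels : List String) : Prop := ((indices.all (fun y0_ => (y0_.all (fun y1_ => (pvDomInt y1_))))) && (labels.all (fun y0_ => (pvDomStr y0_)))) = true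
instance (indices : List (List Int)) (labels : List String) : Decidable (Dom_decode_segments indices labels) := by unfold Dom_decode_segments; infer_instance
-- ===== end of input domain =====

-- B replaces A's transition-emitting state machine by an event-index decomposition
-- (collect B-/O boundary positions once, pair each B- start with its next stop);
-- objective: alternative decomposition, same asymptotic cost on typical tag sequences.

-- ===== PORT A =====
-- label.startswith('B-') (shared by both ports' source)
def pvIsB (s : String) : Bool := PySem.Str.startswith s "B-"

-- Python 'type = None' before any append is rendered by the sentinel "" (never emitted:
-- a triple is appended only when start ≥ 0, and then the stored type is the real one).
def pvStepA (st : List (Int × Int × String) × Int × String) (pt : Int × String) :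
    List (Int × Int × String) × Int × String :=
  if pvIsB pt.2 then
    ((if 0 ≤ st.2.1 then st.1 ++ [(st.2.1, pt.1, st.2.2)] else st.1), pt.1,
      PySem.Str.slice pt.2 (some 2) none)
  else if pt.2 == "O" then
    (if 0 ≤ st.2.1 then (st.1 ++ [(st.2.1, pt.1, st.2.2)], -1, "") else st)
  else st

-- labels[x] is PySem.List.pyGetD (exact under Pre_, which rules out IndexError);
-- pvBodyA is the body of A's outer loop (one lst)
def pvBodyA (labels : List String) (lst : List Int) : List (Int × Int × String) :=
  let data := lst.map (fun x => PySem.List.pyGetD labels x "")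
  let r := (PySem.List.enumerate data 0).foldl pvStepA ([], -1, "")
  if 0 ≤ r.2.1 then r.1 ++ [(r.2.1, (data.length : Int), r.2.2)] else r.1

def decode_segments (indices : List (List Int)) (labels : List String) :
    List (List (Int × Int × String)) :=
  indices.foldl (fun outputs lst => outputs ++ [pvBodyA labels lst]) []

-- ===== PORT B =====
def pvIsStop (s : String) : Bool := pvIsB s || s == "O"

def pvDecodeOne (data : List String) : List (Int × Int × String) :=
  let n : Int := data.length
  let stops := (PySem.List.enumerate data 0).filterMap
    (fun pt => if pvIsStop pt.2 then some pt.1 else none)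
  (PySem.List.enumerate data 0).filterMap
    (fun pt =>
      if pvIsB pt.2 then
        some (pt.1, ((stops.find? (fun q => decide (pt.1 < q))).getD n),
          PySem.Str.slice pt.2 (some 2) none)
      else none)

def decode_segments_alt (indices : List (List Int)) (labels : List String) :
    List (List (Int × Int × String)) :=
  indices.map (fun lst => pvDecodeOne (lst.map (fun x => PySem.List.pyGetD labels x "")))

-- ===== PRECONDITION & SPEC =====
-- Pre_ excludes exactly the inputs where Python A raises IndexError: some index in
-- some list is out of range for labels (negative indices count from the end, as in Python).
def Pre_decode_segments (indices : List (List Int)) (labels : List String) : Prop :=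
  ∀ lst ∈ indices, ∀ x ∈ lst, PySem.Raise.InRange labels.length x
instance (indices : List (List Int)) (labels : List String) :
    Decidable (Pre_decode_segments indices labels) := by
  unfold Pre_decode_segments; infer_instance

def pvWitness_decode_segments : List (List Int) × List String :=
  ([[0, 1, 2, -1]], ["B-PER", "I-PER", "O", "B-ORG"])

def Spec_decode_segments (indices : List (List Int)) (labels : List String)
    (out : List (List (Int × Int × String))) : Prop :=
  out = decode_segments_alt indices labels
instance (indices : List (List Int)) (labels : List String)
    (out : List (List (Int × Int × String))) :
    Decidable (Spec_decode_segments indices labels out) := by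
  unfold Spec_decode_segments; infer_instance

-- ===== CLAIM (what is proved, stated in full; the proofs are below) =====
def Claim_equal_decode_segments : Prop := ∀ (indices : List (List Int)) (labels : List String), Dom_decode_segments indices labels → Pre_decode_segments indices labels → Spec_decode_segments indices labels (decode_segments indices labels)

-- ===== LEMMAS AND PROOFS =====

-- position of the first stop (B- or O label) at index ≥ k in the suffix; k + length if none
def pvFirstStop (k : Int) : List String → Int
  | [] => k
  | t :: rs => if pvIsStop t then k else pvFirstStop (k + 1) rs

-- the segments opened at index ≥ k in the suffix, each closed at its next stop
def pvSegsFrom (k : Int) : List String → List (Int × Int × String)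
  | [] => []
  | t :: rs =>
      if pvIsB t then
        (k, pvFirstStop (k + 1) rs, PySem.Str.slice t (some 2) none) :: pvSegsFrom (k + 1) rs
      else pvSegsFrom (k + 1) rs

def pvStopsOf (k : Int) (rest : List String) : List Int :=
  (PySem.List.enumerate rest k).filterMap (fun pt => if pvIsStop pt.2 then some pt.1 else none)

theorem pvStopsOf_cons (k : Int) (t : String) (rs : List String) :
    pvStopsOf k (t :: rs) =
      (if pvIsStop t then [k] else []) ++ pvStopsOf (k + 1) rs := by
  simp only [pvStopsOf, PySem.List.enumerate_cons, List.filterMap_cons]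
  by_cases h : pvIsStop t <;> simp [h]

theorem pvFindStops (rs : List String) : ∀ (k n s : Int), s < k → n = k + rs.length →
    ((pvStopsOf k rs).find? (fun q => decide (s < q))).getD n =
      pvFirstStop k rs := by
  induction rs with
  | nil =>
      intro k n s _ hn
      simp only [List.length_nil, Int.natCast_zero, add_zero] at hn
      simp [pvStopsOf, PySem.List.enumerate, pvFirstStop, hn]
  | cons t rs ih =>
      intro k n s hs hn
      rw [pvStopsOf_cons]
      by_cases h : pvIsStop t
      · simp [h, pvFirstStop, hs]
      · have hn' : n = (k + 1) + rs.length := by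
          simp only [List.length_cons] at hn; push_cast at hn ⊢; omega
        simpa [h, pvFirstStop] using ih (k + 1) n s (by omega) hn'

theorem pvLemB (rs : List String) : ∀ (k n : Int) (pre : List Int),
    n = k + rs.length → (∀ p ∈ pre, p < k) →
    (PySem.List.enumerate rs k).filterMap
      (fun pt =>
        if pvIsB pt.2 then
          some (pt.1,
            (((pre ++ pvStopsOf k rs).find? (fun q => decide (pt.1 < q))).getD n),
            PySem.Str.slice pt.2 (some 2) none)
        else none) = pvSegsFrom k rs := by
  induction rs with
  | nil => intro k n pre _ _; simp [PySem.List.enumerate, pvSegsFrom]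
  | cons t rs ih =>
      intro k n pre hn hpre
      have hn' : n = (k + 1) + rs.length := by
        simp only [List.length_cons] at hn; push_cast at hn ⊢; omega
      have hfindpre : pre.find? (fun q => decide (k < q)) = none := by
        rw [List.find?_eq_none]; intro p hp
        have := hpre p hp; simpa using by omega
      have hpre2 : ∀ p ∈ pre ++ [k], p < k + 1 := by
        intro p hp
        rcases List.mem_append.mp hp with h | h
        · have := hpre p h; omega
        · simp at h; omega
      rw [PySem.List.enumerate_cons, List.filterMap_cons, pvStopsOf_cons]
      by_cases hB : pvIsB t = true
      · have hstop : pvIsStop t = true := by unfold pvIsStop; rw [hB]; rfl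
        have tail := ih (k + 1) n (pre ++ [k]) hn' hpre2
        rw [List.append_assoc, List.singleton_append] at tail
        have hhead :
            (((pre ++ k :: pvStopsOf (k + 1) rs).find?
                (fun q => decide (k < q))).getD n) = pvFirstStop (k + 1) rs := by
          rw [List.find?_append, hfindpre, Option.none_or]
          simpa [List.find?_cons] using pvFindStops rs (k + 1) n k (by omega) hn'
        simp only [hstop, hB, if_true, List.singleton_append, pvSegsFrom]
        rw [hhead, tail]
      · have hB' : pvIsB t = false := Bool.eq_false_iff.mpr hB
        by_cases hO : t = "O"
        · have hstop : pvIsStop t = true := by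
            unfold pvIsStop; rw [hB']; subst hO; rfl
          have tail := ih (k + 1) n (pre ++ [k]) hn' hpre2
          rw [List.append_assoc, List.singleton_append] at tail
          simp only [hstop, hB', if_true, Bool.false_eq_true, if_false,
            List.singleton_append, pvSegsFrom]
          rw [tail]
        · have hO' : (t == "O") = false := by simpa using hO
          have hstop : pvIsStop t = false := by unfold pvIsStop; rw [hB', hO']; rfl
          have tail := ih (k + 1) n pre hn' (fun p hp => by have := hpre p hp; omega)
          simp only [hstop, hB', Bool.false_eq_true, if_false, List.nil_append,
            pvSegsFrom]
          rw [tail]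

def pvFinishA (n : Int) (r : List (Int × Int × String) × Int × String) :
    List (Int × Int × String) :=
  if 0 ≤ r.2.1 then r.1 ++ [(r.2.1, n, r.2.2)] else r.1

theorem pvLemA (rs : List String) : ∀ (k n : Int), 0 ≤ k → n = k + rs.length →
    ∀ (out : List (Int × Int × String)) (start : Int) (ty : String),
    pvFinishA n ((PySem.List.enumerate rs k).foldl pvStepA (out, start, ty)) =
      out ++ (if 0 ≤ start then [(start, pvFirstStop k rs, ty)] else []) ++ pvSegsFrom k rs := by
  induction rs with
  | nil =>
      intro k n _ hn out start ty
      simp only [List.length_nil, Int.natCast_zero, add_zero] at hn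
      simp [PySem.List.enumerate, pvFinishA, pvFirstStop, pvSegsFrom, hn]
      split <;> simp
  | cons t rs ih =>
      intro k n hk hn out start ty
      have hn' : n = (k + 1) + rs.length := by
        simp only [List.length_cons] at hn; push_cast at hn ⊢; omega
      rw [PySem.List.enumerate_cons, List.foldl_cons]
      by_cases hB : pvIsB t = true
      · have hstop : pvIsStop t = true := by unfold pvIsStop; rw [hB]; rfl
        have step : pvStepA (out, start, ty) (k, t) =
            ((if 0 ≤ start then out ++ [(start, k, ty)] else out), k,
              PySem.Str.slice t (some 2) none) := by
          simp [pvStepA, hB]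
        rw [step, ih (k + 1) n (by omega) hn']
        simp only [pvSegsFrom, pvFirstStop, hB, hstop, hk, if_pos]
        split <;> simp
      · have hB' : pvIsB t = false := Bool.eq_false_iff.mpr hB
        by_cases hO : t = "O"
        · have hstop : pvIsStop t = true := by
            unfold pvIsStop; rw [hB']; subst hO; rfl
          have hO2 : (t == "O") = true := by subst hO; decide
          by_cases hs : 0 ≤ start
          · have step : pvStepA (out, start, ty) (k, t) =
                (out ++ [(start, k, ty)], -1, "") := by
              simp [pvStepA, hB', hO2, hs]
            rw [step, ih (k + 1) n (by omega) hn']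
            simp [pvSegsFrom, pvFirstStop, hB', hstop, hs]
          · have step : pvStepA (out, start, ty) (k, t) = (out, start, ty) := by
              simp [pvStepA, hB', hO2, hs]
            rw [step, ih (k + 1) n (by omega) hn']
            simp [pvSegsFrom, pvFirstStop, hB', hstop, hs]
        · have hO' : (t == "O") = false := by simpa using hO
          have hstop : pvIsStop t = false := by unfold pvIsStop; rw [hB', hO']; rfl
          have step : pvStepA (out, start, ty) (k, t) = (out, start, ty) := by
            simp [pvStepA, hB', hO']
          rw [step, ih (k + 1) n (by omega) hn']
          simp [pvSegsFrom, pvFirstStop, hB', hstop]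

theorem pvOne (data : List String) :
    pvFinishA (data.length) ((PySem.List.enumerate data 0).foldl pvStepA ([], -1, "")) =
      pvDecodeOne data := by
  have hA := pvLemA data 0 (data.length) le_rfl (by simp) [] (-1) ""
  have hB := pvLemB data 0 (data.length) [] (by simp) (by simp)
  simp only [List.nil_append] at hA hB
  rw [hA, if_neg (by norm_num : ¬ (0:Int) ≤ -1), List.nil_append]
  simp only [pvDecodeOne]
  rw [show (PySem.List.enumerate data 0).filterMap
        (fun pt => if pvIsStop pt.2 then some pt.1 else none) = pvStopsOf 0 data from rfl]
  exact hB.symm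

-- ===== VERDICT (by name: the statement is the Claim_ definition above) =====
theorem decode_segments_spec : Claim_equal_decode_segments := by
  intro indices labels _ _
  unfold Spec_decode_segments decode_segments decode_segments_alt
  rw [PySem.List.foldl_append_singleton_eq_map (pvBodyA labels)]
  simp only [List.nil_append]
  apply List.map_congr_left
  intro lst _
  simpa [pvBodyA, pvFinishA] using pvOne (lst.map (fun x => PySem.List.pyGetD labels x ""))
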